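-- pv_equiv track=rewrite | github.com/radio-astro/casa | pipeline/pipeline/extern/findContinuum.py | convertChannelListIntoSelection
-- ===== SOURCE A (Python) =====
-- def splitListIntoContiguousLists(mylist):
--     """
--     This function is called by findContinuumChannels.
--     Called by copyweights. See also splitListIntoHomogenousLists.
--     Converts [1,2,3,5,6,7] into [[1,2,3],[5,6,7]], etc.
--     -Todd Hunter
--     """
--     mylists = []
--     if (len(mylist) < 1):
--         return(mylists)
--     newlist = [mylist[0]]
--     for i in range(1,len(mylist)):
--         if (mylist[i-1] != mylist[i]-1):
--             mylists.append(newlist)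
--             newlist = [mylist[i]]
--         else:
--             newlist.append(mylist[i])
--     mylists.append(newlist)
--     return(mylists)
--
-- def convertChannelListIntoSelection(channels, trim=0, separator=';'):
--     """
--     This function is called by findContinuumChannels.
--     Converts a list of channels into casa selection string syntax.
--     channels: a list of channels
--     trim: the number of channels to trim off of each edge of a block of channels
--     """
--     selection = ''
--     firstList = True
--     if (len(channels) > 0):
--         mylists = splitListIntoContiguousLists(channels)
--         for mylist in mylists:
--             if (mylist[0]+trim <= mylist[-1]-trim):
--                 if (not firstList):
--                     selection += separator
--                 selection += '%d~%d' % (mylist[0]+trim, mylist[-1]-trim)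
--                 firstList = False
--     return(selection)
-- ===== SOURCE B (Python) =====
-- def convertChannelListIntoSelection(channels, trim=0, separator=';'):
--     """Single streaming pass: track (start, prev) of the current contiguous run,
--     emit a segment when the run closes, and join the segments at the end."""
--     if len(channels) == 0:
--         return ''
--     segments = []
--     start = prev = channels[0]
--     for c in channels[1:]:
--         if c == prev + 1:
--             prev = c
--         else:
--             if start + trim <= prev - trim:
--                 segments.append('%d~%d' % (start + trim, prev - trim))
--             start = prev = c
--     if start + trim <= prev - trim:
--         segments.append('%d~%d' % (start + trim, prev - trim))
--     return separator.join(segments)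
-- ===== Notes on version B (the rewrite author's own statement) =====
-- stated objective: simpler
-- what changed: Fuses the two-stage build-the-list-of-contiguous-sublists-then-format pipeline into one streaming pass that keeps only (start, prev) per run and joins the collected segments at the end, eliminating the intermediate list-of-lists and the firstList flag.
import Mathlib
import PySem

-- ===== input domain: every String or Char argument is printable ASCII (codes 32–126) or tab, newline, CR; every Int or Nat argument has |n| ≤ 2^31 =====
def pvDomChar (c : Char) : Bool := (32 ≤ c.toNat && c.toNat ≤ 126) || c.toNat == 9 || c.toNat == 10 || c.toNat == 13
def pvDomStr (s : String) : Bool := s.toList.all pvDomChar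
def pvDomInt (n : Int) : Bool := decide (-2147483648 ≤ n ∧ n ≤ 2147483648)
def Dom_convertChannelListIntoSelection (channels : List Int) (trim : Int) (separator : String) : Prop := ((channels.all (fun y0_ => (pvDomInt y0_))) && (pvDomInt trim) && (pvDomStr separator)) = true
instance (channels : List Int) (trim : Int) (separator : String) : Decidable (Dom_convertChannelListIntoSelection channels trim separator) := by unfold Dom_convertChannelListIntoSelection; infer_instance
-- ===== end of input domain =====

-- B fuses A's build-then-format two-stage pipeline into one streaming pass over the
-- channels that keeps only the endpoints (start, prev) of the current contiguous run
-- and joins the collected segment strings at the end (objective: simpler).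

-- ===== PORT A =====
-- literal port of splitListIntoContiguousLists: index loop over range(1, len(mylist));
-- mylist[0] / mylist[i] are in range wherever evaluated, so pyGetD with default 0 is exact
def splitListIntoContiguousLists (mylist : List Int) : List (List Int) :=
  if mylist.length < 1 then []
  else
    let st := (PySem.List.pyRange 1 (mylist.length : Int) 1).foldl
      (fun (s : List (List Int) × List Int) i =>
        if PySem.List.pyGetD mylist (i - 1) 0 ≠ PySem.List.pyGetD mylist i 0 - 1 then
          (s.1 ++ [s.2], [PySem.List.pyGetD mylist i 0])
        else
          (s.1, s.2 ++ [PySem.List.pyGetD mylist i 0]))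
      ([], [PySem.List.pyGetD mylist 0 0])
    st.1 ++ [st.2]

-- state (selection, firstList); mylist[0] / mylist[-1] via pyGetD (runs are nonempty, so exact)
def convertChannelListIntoSelection (channels : List Int) (trim : Int) (separator : String) : String :=
  if channels.length > 0 then
    ((splitListIntoContiguousLists channels).foldl
      (fun (s : String × Bool) mylist =>
        if PySem.List.pyGetD mylist 0 0 + trim ≤ PySem.List.pyGetD mylist (-1) 0 - trim then
          ((if s.2 then s.1 else s.1 ++ separator) ++
            PySem.Int.toStr (PySem.List.pyGetD mylist 0 0 + trim) ++ "~" ++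
            PySem.Int.toStr (PySem.List.pyGetD mylist (-1) 0 - trim), false)
        else s)
      ("", true)).1
  else ""

-- ===== PORT B =====
-- close the current run [start..prev]: append its selection string if it survives trimming
def pvClose (trim start prev : Int) (segments : List String) : List String :=
  if start + trim ≤ prev - trim then
    segments ++ [PySem.Int.toStr (start + trim) ++ "~" ++ PySem.Int.toStr (prev - trim)]
  else segments

-- the streaming loop of Source B
def pvGo (trim start prev : Int) : List Int → List String → List String
  | [], segments => pvClose trim start prev segments
  | c :: rest, segments =>
    if c = prev + 1 then pvGo trim start c rest segments
    else pvGo trim c c rest (pvClose trim start prev segments)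

def convertChannelListIntoSelection_alt (channels : List Int) (trim : Int) (separator : String) : String :=
  match channels with
  | [] => ""
  | c :: rest => PySem.Str.join separator (pvGo trim c c rest [])

-- ===== PRECONDITION & SPEC =====
def Spec_convertChannelListIntoSelection (channels : List Int) (trim : Int) (separator : String) (out : String) : Prop := out = convertChannelListIntoSelection_alt channels trim separator
instance (channels : List Int) (trim : Int) (separator : String) (out : String) : Decidable (Spec_convertChannelListIntoSelection channels trim separator out) := by unfold Spec_convertChannelListIntoSelection; infer_instance

-- ===== CLAIM (what is proved, stated in full; the proofs are below) =====
def Claim_equal_convertChannelListIntoSelection : Prop := ∀ (channels : List Int) (trim : Int) (separator : String), Dom_convertChannelListIntoSelection channels trim separator → Spec_convertChannelListIntoSelection channels trim separator (convertChannelListIntoSelection channels trim separator)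

-- ===== LEMMAS AND PROOFS =====

-- generic fold over consecutive pairs, structural form of A's index loop
def pvPairFold {σ : Type} (F : σ → Int → Int → σ) : Int → List Int → σ → σ
  | _, [], st => st
  | prev, c :: cs, st => pvPairFold F c cs (F st prev c)

-- structural form of splitListIntoContiguousLists: current run `cur` whose last element is `prev`
def pvRunsFrom (cur : List Int) (prev : Int) : List Int → List (List Int)
  | [] => [cur]
  | c :: cs => if prev ≠ c - 1 then cur :: pvRunsFrom [c] c cs else pvRunsFrom (cur ++ [c]) c cs

-- the segment strings A emits for a list of runs
def pvSegsOf (trim : Int) (lists : List (List Int)) : List String :=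
  lists.filterMap (fun l =>
    if PySem.List.pyGetD l 0 0 + trim ≤ PySem.List.pyGetD l (-1) 0 - trim then
      some (PySem.Int.toStr (PySem.List.pyGetD l 0 0 + trim) ++ "~" ++
        PySem.Int.toStr (PySem.List.pyGetD l (-1) 0 - trim))
    else none)

lemma pvFoldRange_eq_pairFold {σ : Type} (F : σ → Int → Int → σ) :
    ∀ (rest : List Int) (x : Int) (st : σ),
      (List.range rest.length).foldl
        (fun s k => F s ((x :: rest).getD k 0) ((x :: rest).getD (k + 1) 0)) st
      = pvPairFold F x rest st := by
  intro rest
  induction rest with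
  | nil => intro x st; rfl
  | cons c cs ih =>
    intro x st
    simp only [List.length_cons, List.range_succ_eq_map]
    simp only [List.foldl_cons, List.foldl_map, Nat.succ_eq_add_one, List.getD_cons_zero,
      List.getD_cons_succ]
    exact ih c (F st x c)

lemma pvPairFold_split :
    ∀ (rest : List Int) (prev : Int) (acc : List (List Int)) (cur : List Int),
      (pvPairFold (fun (s : List (List Int) × List Int) a b =>
          if a ≠ b - 1 then (s.1 ++ [s.2], [b]) else (s.1, s.2 ++ [b])) prev rest (acc, cur)).1
        ++ [(pvPairFold (fun (s : List (List Int) × List Int) a b =>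
          if a ≠ b - 1 then (s.1 ++ [s.2], [b]) else (s.1, s.2 ++ [b])) prev rest (acc, cur)).2]
      = acc ++ pvRunsFrom cur prev rest := by
  intro rest
  induction rest with
  | nil => intro prev acc cur; simp [pvPairFold, pvRunsFrom]
  | cons c cs ih =>
    intro prev acc cur
    simp only [pvPairFold, pvRunsFrom]
    by_cases h : prev ≠ c - 1
    · simp only [if_pos h]
      rw [ih c (acc ++ [cur]) [c]]
      simp
    · simp only [if_neg h]
      exact ih c acc (cur ++ [c])

lemma pvSplit_eq_runsFrom (x : Int) (rest : List Int) :
    splitListIntoContiguousLists (x :: rest) = pvRunsFrom [x] x rest := by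
  unfold splitListIntoContiguousLists
  rw [if_neg (by simp)]
  rw [PySem.List.pyRange_of_pos 1 ((x :: rest).length : Int) (by norm_num)]
  have hcount : (if (1 : Int) < ((x :: rest).length : Int) then
      ((((x :: rest).length : Int) - 1 + 1 - 1) / 1).toNat else 0) = rest.length := by
    simp only [List.length_cons]
    split_ifs with h
    · omega
    · push_cast at h; omega
  rw [hcount]
  have hidx2 : ∀ (k : Nat), (1 + 1 * (k : Int)) = ((k + 1 : Nat) : Int) := by
    intro k; push_cast; ring
  have hidx' : ∀ (k : Nat), (((k + 1 : Nat) : Int) - 1) = (k : Int) := by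
    intro k; push_cast; ring
  simp only [List.foldl_map, hidx2, hidx', PySem.List.pyGetD_natCast, PySem.List.pyGetD_zero,
    List.getD_cons_zero]
  rw [pvFoldRange_eq_pairFold (fun (s : List (List Int) × List Int) a b =>
    if a ≠ b - 1 then (s.1 ++ [s.2], [b]) else (s.1, s.2 ++ [b])) rest x ([], [x])]
  simpa using pvPairFold_split rest x [] [x]

lemma pvHead_pyGetD {l : List Int} {a : Int} (h : l.head? = some a) :
    PySem.List.pyGetD l 0 0 = a := by
  rw [PySem.List.pyGetD_zero]
  cases l with
  | nil => simp at h
  | cons x xs => simp at h; simp [h]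

lemma pvLast_pyGetD {l : List Int} {a : Int} (h : l.getLast? = some a) :
    PySem.List.pyGetD l (-1) 0 = a := by
  have hne : l ≠ [] := by intro hh; subst hh; simp at h
  rw [PySem.List.pyGetD_neg_one l 0 hne]
  have := List.getLast?_eq_some_getLast (l := l) hne
  rw [this] at h
  exact (Option.some_inj.mp h)

lemma pvGo_eq (trim : Int) :
    ∀ (rest : List Int) (start prev : Int) (cur : List Int) (segs : List String),
      cur.head? = some start → cur.getLast? = some prev →
      pvGo trim start prev rest segs = segs ++ pvSegsOf trim (pvRunsFrom cur prev rest) := by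
  intro rest
  induction rest with
  | nil =>
    intro start prev cur segs hh hl
    simp only [pvGo, pvRunsFrom, pvClose, pvSegsOf, List.filterMap_cons, List.filterMap_nil,
      pvHead_pyGetD hh, pvLast_pyGetD hl]
    split_ifs with h <;> simp
  | cons c cs ih =>
    intro start prev cur segs hh hl
    have hne : cur ≠ [] := by intro hx; subst hx; simp at hh
    simp only [pvGo, pvRunsFrom]
    by_cases h : c = prev + 1
    · rw [if_pos h]
      have hcond : ¬ (prev ≠ c - 1) := by omega
      rw [if_neg hcond]
      apply ih start c (cur ++ [c]) segs
      · rw [List.head?_append_of_ne_nil _ hne]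
        exact hh
      · simp
    · rw [if_neg h]
      have hcond : prev ≠ c - 1 := by omega
      rw [if_pos hcond]
      rw [ih c c [c] (pvClose trim start prev segs) (by simp) (by simp)]
      simp only [pvSegsOf, List.filterMap_cons, pvHead_pyGetD hh, pvLast_pyGetD hl, pvClose]
      split_ifs with hq <;> simp

lemma pvJoin_cons_cons (sep s y : String) (ss : List String) :
    PySem.Str.join sep (s :: y :: ss) = s ++ sep ++ PySem.Str.join sep (y :: ss) := by
  have h : (PySem.Str.join sep (s :: y :: ss)).toList
      = (s ++ sep ++ PySem.Str.join sep (y :: ss)).toList := by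
    simp [PySem.Str.join, PySem.Chars.join, List.intercalate]
  have h2 := congrArg String.ofList h
  rwa [String.ofList_toList, String.ofList_toList] at h2

lemma pvJoin_foldl (sep : String) :
    ∀ (ss : List String) (s : String),
      PySem.Str.join sep (s :: ss) = ss.foldl (fun a b => a ++ sep ++ b) s := by
  intro ss
  induction ss with
  | nil =>
    intro s
    simp [PySem.Str.join, PySem.Chars.join, List.intercalate]
  | cons y t ih =>
    intro s
    rw [List.foldl_cons, ← ih (s ++ sep ++ y), pvJoin_cons_cons]
    cases t with
    | nil =>
      simp [PySem.Str.join, PySem.Chars.join, List.intercalate, String.append_assoc]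
    | cons z t' =>
      rw [pvJoin_cons_cons, pvJoin_cons_cons sep (s ++ sep ++ y) z t']
      simp [String.append_assoc]

lemma pvRenderFalse (trim : Int) (sep : String) :
    ∀ (lists : List (List Int)) (sel : String),
      (lists.foldl
        (fun (s : String × Bool) mylist =>
          if PySem.List.pyGetD mylist 0 0 + trim ≤ PySem.List.pyGetD mylist (-1) 0 - trim then
            ((if s.2 then s.1 else s.1 ++ sep) ++
              PySem.Int.toStr (PySem.List.pyGetD mylist 0 0 + trim) ++ "~" ++
              PySem.Int.toStr (PySem.List.pyGetD mylist (-1) 0 - trim), false)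
          else s)
        (sel, false)).1
      = (pvSegsOf trim lists).foldl (fun a b => a ++ sep ++ b) sel := by
  intro lists
  induction lists with
  | nil => intro sel; simp [pvSegsOf]
  | cons l L ih =>
    intro sel
    by_cases h : PySem.List.pyGetD l 0 0 + trim ≤ PySem.List.pyGetD l (-1) 0 - trim
    · simp only [List.foldl_cons, pvSegsOf, List.filterMap_cons, h, if_true, Bool.false_eq_true,
        if_false, List.foldl_cons]
      rw [ih]
      congr 1
      simp [String.append_assoc]
    · simp only [List.foldl_cons, pvSegsOf, List.filterMap_cons, h, if_false]
      exact ih sel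

lemma pvRenderTrue (trim : Int) (sep : String) :
    ∀ (lists : List (List Int)),
      (lists.foldl
        (fun (s : String × Bool) mylist =>
          if PySem.List.pyGetD mylist 0 0 + trim ≤ PySem.List.pyGetD mylist (-1) 0 - trim then
            ((if s.2 then s.1 else s.1 ++ sep) ++
              PySem.Int.toStr (PySem.List.pyGetD mylist 0 0 + trim) ++ "~" ++
              PySem.Int.toStr (PySem.List.pyGetD mylist (-1) 0 - trim), false)
          else s)
        ("", true)).1
      = PySem.Str.join sep (pvSegsOf trim lists) := by
  intro lists
  induction lists with
  | nil => simp [pvSegsOf, PySem.Str.join]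
  | cons l L ih =>
    by_cases h : PySem.List.pyGetD l 0 0 + trim ≤ PySem.List.pyGetD l (-1) 0 - trim
    · simp only [List.foldl_cons, pvSegsOf, List.filterMap_cons, h, if_true]
      rw [pvRenderFalse, pvJoin_foldl]
      simp [pvSegsOf, String.empty_append]
    · simp only [List.foldl_cons, pvSegsOf, List.filterMap_cons, h, if_false]
      exact ih

-- ===== VERDICT (by name: the statement is the Claim_ definition above) =====
theorem convertChannelListIntoSelection_spec : Claim_equal_convertChannelListIntoSelection := by
  intro channels trim separator _
  unfold Spec_convertChannelListIntoSelection
  cases channels with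
  | nil => rfl
  | cons x rest =>
    unfold convertChannelListIntoSelection
    rw [if_pos (by simp)]
    rw [pvSplit_eq_runsFrom, pvRenderTrue]
    rw [show convertChannelListIntoSelection_alt (x :: rest) trim separator
      = PySem.Str.join separator (pvGo trim x x rest []) from rfl]
    rw [pvGo_eq trim rest x x [x] [] (by simp) (by simp)]
    simp
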